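-- pv_equiv track=rewrite | github.com/NolanCSE/PokTTPRG | RandomPokemonGenerator/PDFReader/PokedexCSVToYaml.py | spaceOut
-- ===== SOURCE A (Python) =====
-- def spaceOut(camelCase):
--     #if there is no space between a lower and upper case letter, insert one
--     i = 0
--     while i < len(camelCase) - 1:
--         if (not camelCase[i].isupper()) and camelCase[i + 1].isupper():
--             camelCase = camelCase[:i + 1] + " " + camelCase[i + 1:]
--             i += 1
--         i += 1
--     return camelCase
-- ===== SOURCE B (Python) =====
-- def spaceOut(camelCase):
--     s = camelCase
--     # phase 1: table of split positions (just after a non-uppercase followed by uppercase)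
--     cuts = [i + 1 for i in range(len(s) - 1)
--             if (not s[i].isupper()) and s[i + 1].isupper()]
--     # phase 2: rebuild by slicing at each cut and joining with single spaces
--     parts = []
--     prev = 0
--     for cut in cuts:
--         parts.append(s[prev:cut])
--         prev = cut
--     parts.append(s[prev:])
--     return ' '.join(parts)
-- ===== Notes on version B (the rewrite author's own statement) =====
-- stated objective: faster
-- what changed: A repeatedly rebuilds the whole string by slicing and concatenating at every lower-to-upper boundary while walking a moving index; B makes one scanning pass that records the cut indices in a table and a second pass that slices the original string at those cuts and joins the parts with spaces.
import Mathlib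
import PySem

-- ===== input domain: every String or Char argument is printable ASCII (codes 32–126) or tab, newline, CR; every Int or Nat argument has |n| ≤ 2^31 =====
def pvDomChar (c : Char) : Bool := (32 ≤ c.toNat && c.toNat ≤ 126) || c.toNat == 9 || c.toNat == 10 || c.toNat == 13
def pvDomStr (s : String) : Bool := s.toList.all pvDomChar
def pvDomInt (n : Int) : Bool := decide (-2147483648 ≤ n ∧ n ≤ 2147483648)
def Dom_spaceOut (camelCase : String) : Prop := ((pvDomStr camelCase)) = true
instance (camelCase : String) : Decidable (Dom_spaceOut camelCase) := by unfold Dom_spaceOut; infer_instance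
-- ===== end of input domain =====

-- B replaces A's quadratic in-place string insertion with a two-phase pass (cut-index table, then slice+join); measurably faster on large inputs.


-- ===== PORT A =====
-- the while loop: state (s, i); on an insertion the string grows and i skips past the new space
def spaceOutLoopA (s : List Char) (i : Nat) : List Char :=
  if h : (i : Int) < (s.length : Int) - 1 then
    if (!(PySem.Chars.isupper (PySem.List.pyGetD s (i : Int) ' '))) &&
        PySem.Chars.isupper (PySem.List.pyGetD s ((i : Int) + 1) ' ') then
      spaceOutLoopA
        (PySem.List.slice s none (some ((i : Int) + 1)) ++ ' ' ::
          PySem.List.slice s (some ((i : Int) + 1)) none)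
        (i + 2)
    else
      spaceOutLoopA s (i + 1)
  else s
termination_by s.length - i
decreasing_by
  · have : (((i : Nat) + 1 : Nat) : Int) = (i : Int) + 1 := by push_cast; ring
    rw [← this, PySem.List.slice_to_natCast, PySem.List.slice_from_natCast]
    simp; omega
  · omega

def spaceOut (camelCase : String) : String :=
  String.ofList (spaceOutLoopA camelCase.toList 0)

-- ===== PORT B =====
-- phase 2's loop 'for cut in cuts: parts.append(s[prev:cut]); prev = cut'
def partsFoldB (s : List Char) (cuts : List Int) : List (List Char) × Int :=
  cuts.foldl (fun acc cut => (acc.1 ++ [PySem.List.slice s (some acc.2) (some cut)], cut)) ([], 0)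

def spaceOut_alt (camelCase : String) : String :=
  let s := camelCase.toList
  let cuts := ((PySem.List.pyRange 0 ((s.length : Int) - 1) 1).filter
      (fun i => (!(PySem.Chars.isupper (PySem.List.pyGetD s i ' '))) &&
        PySem.Chars.isupper (PySem.List.pyGetD s (i + 1) ' '))).map (fun i => i + 1)
  let pr := partsFoldB s cuts
  let parts := pr.1 ++ [PySem.List.slice s (some pr.2) none]
  String.ofList (PySem.Chars.join [' '] parts)

-- ===== PRECONDITION & SPEC =====
def Spec_spaceOut (camelCase : String) (out : String) : Prop := out = spaceOut_alt camelCase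
instance (camelCase : String) (out : String) : Decidable (Spec_spaceOut camelCase out) := by unfold Spec_spaceOut; infer_instance

-- ===== CLAIM (what is proved, stated in full; the proofs are below) =====
def Claim_equal_spaceOut : Prop := ∀ (camelCase : String), Dom_spaceOut camelCase → Spec_spaceOut camelCase (spaceOut camelCase)

-- ===== LEMMAS AND PROOFS =====

-- the common specification: insert ' ' at each non-upper→upper adjacent pair
def insSpec : List Char → List Char
  | [] => []
  | [c] => [c]
  | a :: b :: t =>
    if (!(PySem.Chars.isupper a)) && PySem.Chars.isupper b then
      a :: ' ' :: insSpec (b :: t)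
    else
      a :: insSpec (b :: t)

lemma getD_append_cons (pre : List Char) (x : Char) (r : List Char) (d : Char) :
    (pre ++ x :: r).getD pre.length d = x := by
  simp [List.getD]

lemma loopA_eq (tail : List Char) : ∀ (pre : List Char),
    spaceOutLoopA (pre ++ tail) pre.length = pre ++ insSpec tail := by
  induction tail with
  | nil =>
    intro pre
    rw [spaceOutLoopA]
    simp [insSpec]
  | cons a rest ih =>
    intro pre
    match rest with
    | [] =>
      rw [spaceOutLoopA]
      have h : ¬ ((pre.length : Int) < ((pre ++ [a]).length : Int) - 1) := by simp
      rw [dif_neg h]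
      simp [insSpec]
    | b :: t =>
      rw [spaceOutLoopA]
      have hlt : ((pre.length : Nat) : Int) < ((pre ++ a :: b :: t).length : Int) - 1 := by
        simp; omega
      rw [dif_pos hlt]
      have h1 : PySem.List.pyGetD (pre ++ a :: b :: t) (pre.length : Int) ' ' = a := by
        rw [PySem.List.pyGetD_natCast, getD_append_cons]
      have hc : ((pre.length : Nat) : Int) + 1 = (((pre.length + 1 : Nat)) : Int) := by push_cast; ring
      have h2 : PySem.List.pyGetD (pre ++ a :: b :: t) ((pre.length : Int) + 1) ' ' = b := by
        rw [hc, PySem.List.pyGetD_natCast]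
        have : (pre ++ a :: b :: t) = (pre ++ [a]) ++ b :: t := by simp
        rw [this]
        have hl : pre.length + 1 = (pre ++ [a]).length := by simp
        rw [hl, getD_append_cons]
      rw [h1, h2]
      by_cases hcond : ((!(PySem.Chars.isupper a)) && PySem.Chars.isupper b) = true
      · rw [if_pos hcond]
        have hsl : PySem.List.slice (pre ++ a :: b :: t) none (some ((pre.length : Int) + 1)) ++ ' ' ::
            PySem.List.slice (pre ++ a :: b :: t) (some ((pre.length : Int) + 1)) none
            = (pre ++ [a, ' ']) ++ b :: t := by
          have hre : pre ++ a :: b :: t = (pre ++ [a]) ++ b :: t := by simp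
          rw [hc, PySem.List.slice_to_natCast, PySem.List.slice_from_natCast, hre,
            List.take_left' (by simp), List.drop_left' (by simp)]
          simp
        rw [hsl]
        have hlen : pre.length + 2 = (pre ++ [a, ' ']).length := by simp
        rw [hlen, ih (pre ++ [a, ' '])]
        simp [insSpec, hcond]
      · rw [if_neg hcond]
        have hre : pre ++ a :: b :: t = (pre ++ [a]) ++ b :: t := by simp
        have hlen : pre.length + 1 = (pre ++ [a]).length := by simp
        rw [hre, hlen, ih (pre ++ [a])]
        simp [insSpec, hcond]

lemma spaceOut_eq_insSpec (s : String) : spaceOut s = String.ofList (insSpec s.toList) := by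
  have := loopA_eq s.toList []
  simpa [spaceOut] using congrArg String.ofList this

-- B side ------------------------------------------------------------------

-- recursive form of phase 2 (parts list including the final tail)
def segs (s : List Char) (prev : Nat) : List Nat → List (List Char)
  | [] => [s.drop prev]
  | c :: cs => (s.drop prev).take (c - prev) :: segs s c cs

lemma partsFoldB_eq (s : List Char) (cs : List Nat) :
    ∀ (acc : List (List Char)) (prev : Nat),
      (cs.map (fun (k : Nat) => (k : Int))).foldl
          (fun acc cut => (acc.1 ++ [PySem.List.slice s (some acc.2) (some cut)], cut))
          (acc, (prev : Int))
        = (acc ++ (segs s prev cs).dropLast, ((cs.getLastD prev : Nat) : Int)) := by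
  induction cs with
  | nil =>
    intro acc prev
    rw [List.map_nil, List.foldl_nil, segs]
    simp [List.getLastD]
  | cons c cs ih =>
    intro acc prev
    simp only [List.map_cons, List.foldl_cons]
    rw [PySem.List.slice_natCast, ih]
    cases cs <;> simp [segs, List.getLastD]

lemma segs_ne_nil (s : List Char) (prev : Nat) (cs : List Nat) : segs s prev cs ≠ [] := by
  cases cs <;> simp [segs]

lemma segs_last (s : List Char) (cs : List Nat) : ∀ (prev : Nat),
    (segs s prev cs).dropLast ++ [s.drop (cs.getLastD prev)] = segs s prev cs := by
  induction cs with
  | nil => intro prev; simp [segs]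
  | cons c cs ih =>
    intro prev
    rw [segs, List.dropLast_cons_of_ne_nil (segs_ne_nil s c cs), List.getLastD_cons,
      List.cons_append, ih c]

lemma join_cons (x : List Char) (ps : List (List Char)) (h : ps ≠ []) :
    PySem.Chars.join [' '] (x :: ps) = x ++ ' ' :: PySem.Chars.join [' '] ps := by
  cases ps with
  | nil => exact absurd rfl h
  | cons y ys => simp [PySem.Chars.join, List.intercalate]

-- shifting all cuts and the start by one strips a leading character uniformly
lemma segs_shift (s : List Char) (a : Char) (cs : List Nat) : ∀ (prev : Nat),
    segs (a :: s) (prev + 1) (cs.map (· + 1)) = segs s prev cs := by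
  induction cs with
  | nil => intro prev; simp [segs]
  | cons c cs ih => intro prev; simp [segs, ih]

lemma join_segs_shift (s : List Char) (a : Char) (cs : List Nat) :
    PySem.Chars.join [' '] (segs (a :: s) 0 (cs.map (· + 1)))
      = a :: PySem.Chars.join [' '] (segs s 0 cs) := by
  cases cs with
  | nil => simp [segs]
  | cons c cs =>
    simp only [List.map_cons, segs, List.drop_zero, Nat.sub_zero]
    rw [show (c + 1 : Nat) = c + 1 from rfl]
    have : segs (a :: s) (c + 1) (cs.map (· + 1)) = segs s c cs := segs_shift s a cs c
    rw [this]
    rw [join_cons _ _ (segs_ne_nil _ _ _), join_cons _ _ (segs_ne_nil _ _ _)]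
    simp

-- the cut table, at the Nat level
def natCuts (s : List Char) : List Nat :=
  ((List.range (s.length - 1)).filter
      (fun k => (!(PySem.Chars.isupper (s.getD k ' '))) &&
        PySem.Chars.isupper (s.getD (k + 1) ' '))).map (· + 1)

lemma natCuts_cons (a b : Char) (t : List Char) :
    natCuts (a :: b :: t)
      = (if (!(PySem.Chars.isupper a)) && PySem.Chars.isupper b then [1] else [])
          ++ (natCuts (b :: t)).map (· + 1) := by
  unfold natCuts
  rw [show (a :: b :: t).length - 1 = ((b :: t).length - 1) + 1 by simp]
  rw [List.range_succ_eq_map]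
  simp only [List.filter_cons, List.filter_map, List.map_map]
  by_cases h : ((!(PySem.Chars.isupper a)) && PySem.Chars.isupper b) = true
  · simp only [List.getD_cons_zero, List.getD_cons_succ, h, if_pos]
    simp [List.map_map, Function.comp_def, Nat.succ_eq_add_one]
  · simp only [List.getD_cons_zero, List.getD_cons_succ] at *
    simp [h, List.map_map, Function.comp_def, Nat.succ_eq_add_one]

lemma join_segs_natCuts (s : List Char) :
    PySem.Chars.join [' '] (segs s 0 (natCuts s)) = insSpec s := by
  induction s with
  | nil => simp [natCuts, segs, insSpec, PySem.Chars.join, List.intercalate]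
  | cons a rest ih =>
    match rest with
    | [] => simp [natCuts, segs, insSpec, PySem.Chars.join, List.intercalate]
    | b :: t =>
      rw [natCuts_cons]
      by_cases h : ((!(PySem.Chars.isupper a)) && PySem.Chars.isupper b) = true
      · rw [if_pos h]
        simp only [List.singleton_append, segs, List.drop_zero, List.take_succ_cons,
          List.take_zero, Nat.sub_zero]
        rw [show (1 : Nat) = 0 + 1 from rfl, segs_shift]
        rw [join_cons _ _ (segs_ne_nil _ _ _)]
        simp [insSpec, h, ih]
      · rw [if_neg h]
        simp only [List.nil_append]
        rw [join_segs_shift, ih]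
        simp [insSpec, h]

lemma cuts_int_eq (s : List Char) :
    ((PySem.List.pyRange 0 ((s.length : Int) - 1) 1).filter
        (fun i => (!(PySem.Chars.isupper (PySem.List.pyGetD s i ' '))) &&
          PySem.Chars.isupper (PySem.List.pyGetD s (i + 1) ' '))).map (fun i => i + 1)
      = (natCuts s).map (fun (k : Nat) => (k : Int)) := by
  have hr : PySem.List.pyRange 0 ((s.length : Int) - 1) 1
      = (List.range (s.length - 1)).map (fun (k : Nat) => (k : Int)) := by
    cases s with
    | nil => simp
    | cons x xs =>
      have : ((x :: xs).length : Int) - 1 = ((xs.length : Nat) : Int) := by simp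
      rw [this, PySem.List.pyRange_zero_natCast]
      simp
  have hget : ∀ k : Nat, PySem.List.pyGetD s ((k : Int) + 1) ' ' = s.getD (k + 1) ' ' := by
    intro k
    rw [show ((k : Int) + 1) = ((k + 1 : Nat) : Int) by push_cast; ring,
      PySem.List.pyGetD_natCast]
  rw [hr, List.filter_map, List.map_map, natCuts, List.map_map]
  simp [Function.comp_def, hget, List.getD]

lemma spaceOut_alt_eq_insSpec (s : String) : spaceOut_alt s = String.ofList (insSpec s.toList) := by
  unfold spaceOut_alt partsFoldB
  simp only []
  rw [cuts_int_eq]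
  rw [show ((0 : Int)) = ((0 : Nat) : Int) from rfl, partsFoldB_eq]
  rw [PySem.List.slice_from_natCast]
  simp only [List.nil_append]
  rw [segs_last, join_segs_natCuts]

-- ===== VERDICT (by name: the statement is the Claim_ definition above) =====
theorem spaceOut_spec : Claim_equal_spaceOut := by
  intro s _
  unfold Spec_spaceOut
  rw [spaceOut_eq_insSpec, spaceOut_alt_eq_insSpec]
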